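-- pv_equiv track=rewrite | github.com/jDomantas/aoc2021 | day23.py | target_state
-- ===== SOURCE A (Python) =====
-- def target_state(inp):
--     cor = '...........'
--     a, b, c, d = '', '', '', ''
--     for line in inp.splitlines():
--         if line[3] == '#' or line[3] == '.':
--             continue
--         a += 'A'
--         b += 'B'
--         c += 'C'
--         d += 'D'
--     return cor, a, b, c, d
-- ===== SOURCE B (Python) =====
-- def target_state(inp):
--     def rest(lines):
--         if not lines:
--             return ('', '', '', '')
--         a, b, c, d = rest(lines[1:])
--         if lines[0][3] in '#.':
--             return (a, b, c, d)
--         return ('A' + a, 'B' + b, 'C' + c, 'D' + d)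
--     return ('...........',) + rest(inp.splitlines())
-- ===== Notes on version B (the rewrite author's own statement) =====
-- stated objective: alternative
-- what changed: Replaces the imperative loop with four mutable string accumulators by a recursion over the line list that builds the four strings back-to-front by prepending one letter per qualifying line as the recursion returns.
import Mathlib
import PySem

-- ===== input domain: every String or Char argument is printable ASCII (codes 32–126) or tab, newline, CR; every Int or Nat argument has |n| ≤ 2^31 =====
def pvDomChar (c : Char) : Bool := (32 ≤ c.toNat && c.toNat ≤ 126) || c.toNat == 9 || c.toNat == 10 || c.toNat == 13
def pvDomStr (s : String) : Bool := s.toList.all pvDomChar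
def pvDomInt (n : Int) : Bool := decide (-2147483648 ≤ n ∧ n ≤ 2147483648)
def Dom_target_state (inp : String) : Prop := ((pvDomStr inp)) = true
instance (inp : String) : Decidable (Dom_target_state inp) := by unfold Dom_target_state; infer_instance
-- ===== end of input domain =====

-- B replaces A's loop with four mutable accumulators by a recursion over the line list that
-- builds the four strings back-to-front (prepending on return); objective: alternative decomposition.

-- ===== PORT A =====
-- the loop over splitlines with the four accumulators (as List Char; joined by String.ofList at return)
def tsLoopA (lines : List String) (a b c d : List Char) :
    List Char × List Char × List Char × List Char :=
  match lines with
  | [] => (a, b, c, d)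
  | line :: rest =>
    match PySem.Str.pyGet? line 3 with
    | none => tsLoopA rest a b c d      -- line[3] raises IndexError in Python: excluded by Pre_
    | some ch =>
      if ch = '#' ∨ ch = '.' then tsLoopA rest a b c d
      else tsLoopA rest (a ++ ['A']) (b ++ ['B']) (c ++ ['C']) (d ++ ['D'])

def target_state (inp : String) : String × String × String × String × String :=
  let cor := "..........."
  let p := tsLoopA (PySem.Str.splitlines inp) [] [] [] []
  (cor, String.ofList p.1, String.ofList p.2.1, String.ofList p.2.2.1, String.ofList p.2.2.2)

-- ===== PORT B =====
-- Source B's inner 'rest': recursion over the line list, prepending one letter per qualifying line on return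
def tsRestB (lines : List String) : List Char × List Char × List Char × List Char :=
  match lines with
  | [] => ([], [], [], [])
  | line :: tl =>
    let (a, b, c, d) := tsRestB tl
    match PySem.Str.pyGet? line 3 with
    | none => (a, b, c, d)              -- line[3] raises IndexError in Python: excluded by Pre_
    | some ch =>
      if ch = '#' ∨ ch = '.' then (a, b, c, d)
      else ('A' :: a, 'B' :: b, 'C' :: c, 'D' :: d)

def target_state_alt (inp : String) : String × String × String × String × String :=
  let p := tsRestB (PySem.Str.splitlines inp)
  ("...........", String.ofList p.1, String.ofList p.2.1, String.ofList p.2.2.1, String.ofList p.2.2.2)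

-- ===== PRECONDITION & SPEC =====
-- Pre_ excludes exactly the inputs where some line has fewer than 4 characters: there Python A
-- (and Python B alike) raises IndexError on line[3].
def Pre_target_state (inp : String) : Prop :=
  ∀ line ∈ PySem.Str.splitlines inp, 4 ≤ line.toList.length
instance (inp : String) : Decidable (Pre_target_state inp) := by
  unfold Pre_target_state; infer_instance

def pvWitness_target_state : String := "###A###\n###B###"

def Spec_target_state (inp : String) (out : String × String × String × String × String) : Prop := out = target_state_alt inp
instance (inp : String) (out : String × String × String × String × String) : Decidable (Spec_target_state inp out) := by unfold Spec_target_state; infer_instance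

-- ===== CLAIM (what is proved, stated in full; the proofs are below) =====
def Claim_equal_target_state : Prop := ∀ (inp : String), Dom_target_state inp → Pre_target_state inp → Spec_target_state inp (target_state inp)

-- ===== LEMMAS AND PROOFS =====

-- A's tail loop equals B's recursion with the accumulators appended in front.
theorem tsLoopA_eq_restB (lines : List String) (a b c d : List Char) :
    tsLoopA lines a b c d =
      (a ++ (tsRestB lines).1, b ++ (tsRestB lines).2.1,
       c ++ (tsRestB lines).2.2.1, d ++ (tsRestB lines).2.2.2) := by
  induction lines generalizing a b c d with
  | nil => simp [tsLoopA, tsRestB]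
  | cons line rest ih =>
    rw [tsLoopA, tsRestB]
    cases h : PySem.Str.pyGet? line 3 with
    | none => simp [ih]
    | some ch =>
      by_cases hc : ch = '#' ∨ ch = '.'
      · simp [hc, ih]
      · simp [hc, ih]

theorem target_state_spec : Claim_equal_target_state := by
  intro inp _ _
  unfold Spec_target_state target_state target_state_alt
  rw [tsLoopA_eq_restB]
  simp
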